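-- pv_equiv track=rewrite | github.com/jramaswami/Binary_Search_Python | moo.py | solve
-- ===== SOURCE A (Python) =====
-- import math
--
-- def solve(cows):
--     left = [0 for _ in cows]
--     right = [0 for _ in cows]
--
--     curr_left = math.inf
--     for i in range(len(cows) - 1, -1, -1):
--         cow = cows[i]
--         if cow == 'L':
--             curr_left = 0
--         elif cow == 'R':
--             curr_left = math.inf
--         else:
--             curr_left += 1
--         left[i] = curr_left
--
--     curr_right = math.inf
--     for i, cow in enumerate(cows):
--         if cow == 'R':
--             curr_right = 0
--         elif cow == 'L':
--             curr_right = math.inf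
--         else:
--             curr_right += 1
--         right[i] = curr_right
--
--     cows0 = list(cows)
--     for i, _ in enumerate(cows0):
--         if left[i] == right[i]:
--             cows0[i] = '@'
--         elif left[i] < right[i]:
--             cows0[i] = 'L'
--         elif right[i] < left[i]:
--             cows0[i] = 'R'
--
--     return "".join(cows0)
-- ===== SOURCE B (Python) =====
-- def solve(cows):
--     # One forward pass: fill each maximal run of non-marker cells from its
--     # bounding markers (left marker lm, right marker rm).
--     def fill(lm, g, rm):
--         if rm == 'L':
--             if lm == 'R':
--                 h, odd = divmod(g, 2)
--                 return 'R' * h + '@' * odd + 'L' * h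
--             return 'L' * g
--         else:  # rm is 'R' or absent (end of string): same rule either way
--             return 'R' * g if lm == 'R' else '@' * g
--
--     out = []
--     lm = None
--     g = 0
--     for c in cows:
--         if c == 'L' or c == 'R':
--             out.append(fill(lm, g, c))
--             out.append(c)
--             lm, g = c, 0
--         else:
--             g += 1
--     out.append(fill(lm, g, None))
--     return ''.join(out)
-- ===== Notes on version B (the rewrite author's own statement) =====
-- stated objective: faster
-- what changed: Replaced A's two whole-array distance scans (nearest-L from the right, nearest-R from the left, with inf sentinels) plus a third per-cell comparison pass by a single forward pass that collects each maximal run of non-marker cells and fills it in bulk from its two bounding markers (L-L run -> all L, R-R -> all R, R-L -> half R / half L with an '@' middle, L-R or unbounded -> '@').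
import Mathlib
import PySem

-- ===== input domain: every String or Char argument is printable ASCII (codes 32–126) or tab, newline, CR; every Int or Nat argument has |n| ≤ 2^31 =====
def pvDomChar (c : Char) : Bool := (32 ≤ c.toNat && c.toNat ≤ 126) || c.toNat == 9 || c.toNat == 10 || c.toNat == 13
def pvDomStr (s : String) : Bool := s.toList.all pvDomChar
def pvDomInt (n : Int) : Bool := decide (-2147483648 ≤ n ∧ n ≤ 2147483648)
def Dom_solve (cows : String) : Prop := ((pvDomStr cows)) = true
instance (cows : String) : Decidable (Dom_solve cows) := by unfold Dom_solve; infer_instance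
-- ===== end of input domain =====

-- B replaces A's three whole-array passes (per-cell inf-distance arithmetic) by a single
-- forward pass filling each maximal run of non-marker cells in bulk from its two bounding
-- markers — measurably faster by a constant factor.

-- ===== PORT A =====
-- math.inf is modelled by ⊤ of WithTop ℤ: on the values A ever holds
-- (nonnegative integers and inf) +1, == and < agree exactly with Python float-inf semantics.
def stepL (c : Char) (s : WithTop ℤ) : WithTop ℤ :=
  if c = 'L' then 0 else if c = 'R' then ⊤ else s + 1

def stepR (c : Char) (s : WithTop ℤ) : WithTop ℤ :=
  if c = 'R' then 0 else if c = 'L' then ⊤ else s + 1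

-- the backward index loop writing left[i]: structural recursion from the right
-- (.2 carries curr_left after the front cell is processed)
def leftScan : List Char → WithTop ℤ → List (WithTop ℤ) × WithTop ℤ
  | [], s => ([], s)
  | c :: rest, s =>
      let p := leftScan rest s
      let s2 := stepL c p.2
      (s2 :: p.1, s2)

-- the forward loop writing right[i]
def rightScan (s : WithTop ℤ) : List Char → List (WithTop ℤ)
  | [] => []
  | c :: rest =>
      let s2 := stepR c s
      s2 :: rightScan s2 rest

-- the third loop's three branches; exactly one fires at every cell
-- (explicit Decidable instances only to keep the definition computable)
def combine (l r : WithTop ℤ) : Char :=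
  @ite _ (l = r) (WithTop.decidableEq l r) '@'
    (@ite _ (l < r) (WithTop.decidableLT l r) 'L' 'R')

def solve (cows : String) : String :=
  String.ofList (List.zipWith combine (leftScan cows.toList ⊤).1 (rightScan ⊤ cows.toList))

-- ===== PORT B =====
-- fill a gap of g non-marker cells between left marker lm (none = start of string)
-- and right marker rm (none = end of string)
def fillGap (lm : Option Char) (g : Nat) (rm : Option Char) : List Char :=
  if rm = some 'L' then
    if lm = some 'R' then
      List.replicate (g / 2) 'R' ++ List.replicate (g % 2) '@' ++ List.replicate (g / 2) 'L'
    else List.replicate g 'L'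
  else if lm = some 'R' then List.replicate g 'R' else List.replicate g '@'

def goB (lm : Option Char) (g : Nat) : List Char → List Char
  | [] => fillGap lm g none
  | c :: rest =>
      if c = 'L' ∨ c = 'R' then fillGap lm g (some c) ++ c :: goB (some c) 0 rest
      else goB lm (g + 1) rest

def solve_alt (cows : String) : String := String.ofList (goB none 0 cows.toList)

-- ===== PRECONDITION & SPEC =====
def Spec_solve (cows : String) (out : String) : Prop := out = solve_alt cows
instance (cows : String) (out : String) : Decidable (Spec_solve cows out) := by unfold Spec_solve; infer_instance

-- ===== CLAIM (what is proved, stated in full; the proofs are below) =====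
def Claim_equal_solve : Prop := ∀ (cows : String), Dom_solve cows → Spec_solve cows (solve cows)

-- ===== LEMMAS AND PROOFS =====

def isDot (c : Char) : Prop := c ≠ 'L' ∧ c ≠ 'R'

theorem stepL_dot (c : Char) (h : isDot c) (s : WithTop ℤ) : stepL c s = s + 1 := by
  simp [stepL, h.1, h.2]

theorem stepR_dot (c : Char) (h : isDot c) (s : WithTop ℤ) : stepR c s = s + 1 := by
  simp [stepR, h.1, h.2]

theorem coe_add_one (a : ℤ) : ((a : WithTop ℤ) + 1) = ((a + 1 : ℤ) : WithTop ℤ) := by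
  rw [← WithTop.coe_one, ← WithTop.coe_add]

theorem combine_coe_coe (a b : ℤ) :
    combine (↑a) (↑b) = if a = b then '@' else if a < b then 'L' else 'R' := by
  simp [combine]

theorem combine_top_coe (b : ℤ) : combine ⊤ (↑b) = 'R' := by
  simp [combine]

theorem combine_coe_top (a : ℤ) : combine (↑a) ⊤ = 'L' := by
  simp [combine, WithTop.coe_lt_top]

theorem combine_top_top : combine ⊤ ⊤ = '@' := by
  simp [combine]

-- leftScan on an all-dot list, ⊤ seed
theorem leftScan_dots_top (gs : List Char) (h : ∀ c ∈ gs, isDot c) :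
    leftScan gs ⊤ = (List.replicate gs.length ⊤, ⊤) := by
  induction gs with
  | nil => rfl
  | cons c gs ih =>
      have hc := h c (by simp)
      have ih' := ih (fun d hd => h d (by simp [hd]))
      simp [leftScan, ih', stepL_dot c hc, List.replicate_succ]

-- leftScan on an all-dot list, finite seed
theorem leftScan_dots_coe (gs : List Char) (h : ∀ c ∈ gs, isDot c) (k : ℤ) :
    leftScan gs (↑k) =
      ((List.range gs.length).map (fun j : ℕ => ((k + gs.length - j : ℤ) : WithTop ℤ)),
        ((k + gs.length : ℤ) : WithTop ℤ)) := by
  induction gs with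
  | nil => simp [leftScan]
  | cons c gs ih =>
      have hc := h c (by simp)
      have ih' := ih (fun d hd => h d (by simp [hd]))
      simp only [leftScan, ih', stepL_dot c hc, List.length_cons, coe_add_one]
      rw [Prod.mk.injEq]
      constructor
      · rw [List.range_succ_eq_map, List.map_cons, List.map_map]
        congr 1
        · rw [WithTop.coe_eq_coe]; push_cast; ring
        · apply List.map_congr_left
          intro j hj
          simp only [Function.comp]
          rw [WithTop.coe_eq_coe]; push_cast; ring
      · rw [WithTop.coe_eq_coe]; push_cast; ring

theorem rightScan_top (gs : List Char) (h : ∀ c ∈ gs, isDot c) :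
    rightScan ⊤ gs = List.replicate gs.length ⊤ := by
  induction gs with
  | nil => rfl
  | cons c gs ih =>
      have hc := h c (by simp)
      simp [rightScan, stepR_dot c hc, ih (fun d hd => h d (by simp [hd])), List.replicate_succ]

theorem rightScan_coe (gs : List Char) (h : ∀ c ∈ gs, isDot c) (k : ℤ) :
    rightScan (↑k) gs = (List.range gs.length).map (fun j : ℕ => ((k + j + 1 : ℤ) : WithTop ℤ)) := by
  induction gs generalizing k with
  | nil => rfl
  | cons c gs ih =>
      have hc := h c (by simp)
      simp only [rightScan, stepR_dot c hc, List.length_cons, coe_add_one]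
      rw [ih (fun d hd => h d (by simp [hd])) (k + 1), List.range_succ_eq_map, List.map_cons,
        List.map_map]
      congr 1
      · rw [WithTop.coe_eq_coe]; push_cast; ring
      · apply List.map_congr_left
        intro j hj
        simp only [Function.comp]
        rw [WithTop.coe_eq_coe]; push_cast; ring

-- the four gap shapes
theorem gap_at (n : Nat) (f g : ℕ → WithTop ℤ) :
    List.zipWith combine ((List.range n).map f) ((List.range n).map g) =
      (List.range n).map (fun j => combine (f j) (g j)) := by
  simp [List.zipWith_map, List.zipWith_self]

theorem zip_top_top (n : Nat) :
    List.zipWith combine (List.replicate n ⊤) (List.replicate n (⊤ : WithTop ℤ)) =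
      List.replicate n '@' := by
  induction n with
  | zero => rfl
  | succ n ih => simp [List.replicate_succ, combine_top_top]


theorem zip_top_fin (n : Nat) (l : List (WithTop ℤ)) (hl : l.length = n) (h : ∀ x ∈ l, x ≠ ⊤) :
    List.zipWith combine (List.replicate n ⊤) l = List.replicate n 'R' := by
  induction l generalizing n with
  | nil => subst hl; rfl
  | cons a l ih =>
      subst hl
      simp only [List.length_cons, List.replicate_succ, List.zipWith_cons_cons,
        ih l.length rfl (fun x hx => h x (by simp [hx]))]
      congr 1
      obtain ⟨b, rfl⟩ := WithTop.ne_top_iff_exists.mp (h a (by simp))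
      exact combine_top_coe b

theorem zip_fin_top (n : Nat) (l : List (WithTop ℤ)) (hl : l.length = n) (h : ∀ x ∈ l, x ≠ ⊤) :
    List.zipWith combine l (List.replicate n ⊤) = List.replicate n 'L' := by
  induction l generalizing n with
  | nil => subst hl; rfl
  | cons a l ih =>
      subst hl
      simp only [List.length_cons, List.replicate_succ, List.zipWith_cons_cons,
        ih l.length rfl (fun x hx => h x (by simp [hx]))]
      congr 1
      obtain ⟨b, rfl⟩ := WithTop.ne_top_iff_exists.mp (h a (by simp))
      exact combine_coe_top b

theorem zip_mixed (g : Nat) :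
    (List.range g).map (fun j : ℕ => combine (((g : ℤ) - j : ℤ) : WithTop ℤ) (((j : ℤ) + 1 : ℤ) : WithTop ℤ)) =
      List.replicate (g / 2) 'R' ++ List.replicate (g % 2) '@' ++ List.replicate (g / 2) 'L' := by
  apply List.ext_getElem
  · simp; omega
  · intro j hj hj'
    simp only [List.getElem_map, List.getElem_range, combine_coe_coe]
    have hjg : j < g := by simpa using hj
    by_cases h1 : j < g / 2
    · rw [List.getElem_append_left (by simp; omega), List.getElem_append_left (by simpa using h1),
        List.getElem_replicate, if_neg (by omega), if_neg (by omega)]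
    · by_cases h2 : j < g / 2 + g % 2
      · rw [List.getElem_append_left (by simp; omega),
          List.getElem_append_right (by simpa using h1), List.getElem_replicate,
          if_pos (by omega)]
      · rw [List.getElem_append_right (by simp; omega), List.getElem_replicate,
          if_neg (by omega), if_pos (by omega)]

-- the gap between markers comes out the same under both programs
theorem gap_eq (gs : List Char) (h : ∀ c ∈ gs, isDot c) (lm rm : Option Char) :
    List.zipWith combine
      (leftScan gs (if rm = some 'L' then (0 : WithTop ℤ) else ⊤)).1
      (rightScan (if lm = some 'R' then (0 : WithTop ℤ) else ⊤) gs) =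
    fillGap lm gs.length rm := by
  by_cases hr : rm = some 'L' <;> by_cases hl : lm = some 'R' <;>
    simp only [hr, hl, fillGap, reduceIte]
  · -- R … L : mixed
    rw [show ((0 : WithTop ℤ)) = ((0 : ℤ) : WithTop ℤ) by norm_num]
    rw [leftScan_dots_coe gs h 0, rightScan_coe gs h 0]
    simp only
    rw [gap_at gs.length _ _, ← zip_mixed gs.length]
    apply List.map_congr_left
    intro j hj
    norm_num
  · -- ? … L with lm ≠ R : all L
    rw [show ((0 : WithTop ℤ)) = ((0 : ℤ) : WithTop ℤ) by norm_num,
      leftScan_dots_coe gs h 0, rightScan_top gs h]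
    apply zip_fin_top gs.length _ (by simp)
    intro x hx
    simp only [List.mem_map] at hx
    obtain ⟨j, -, hj⟩ := hx
    exact hj ▸ WithTop.coe_ne_top
  · -- R … (R or end) : all R
    rw [leftScan_dots_top gs h, show ((0 : WithTop ℤ)) = ((0 : ℤ) : WithTop ℤ) by norm_num,
      rightScan_coe gs h 0]
    apply zip_top_fin gs.length _ (by simp)
    intro x hx
    simp only [List.mem_map] at hx
    obtain ⟨j, -, hj⟩ := hx
    exact hj ▸ WithTop.coe_ne_top
  · -- neither : all @
    rw [leftScan_dots_top gs h, rightScan_top gs h]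
    exact zip_top_top gs.length

theorem leftScan_fst_length (l : List Char) (s : WithTop ℤ) :
    (leftScan l s).1.length = l.length := by
  induction l with
  | nil => rfl
  | cons c l ih => simp [leftScan, ih]

theorem rightScan_length (l : List Char) (s : WithTop ℤ) : (rightScan s l).length = l.length := by
  induction l generalizing s with
  | nil => rfl
  | cons c l ih => simp [rightScan, ih]

theorem leftScan_append (xs ys : List Char) (s : WithTop ℤ) :
    leftScan (xs ++ ys) s =
      ((leftScan xs (leftScan ys s).2).1 ++ (leftScan ys s).1,
        (leftScan xs (leftScan ys s).2).2) := by
  induction xs with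
  | nil => simp [leftScan]
  | cons x xs ih => simp [leftScan, ih]

theorem rightScan_append (xs ys : List Char) (s : WithTop ℤ) :
    rightScan s (xs ++ ys) =
      rightScan s xs ++ rightScan (List.foldl (fun a c => stepR c a) s xs) ys := by
  induction xs generalizing s with
  | nil => rfl
  | cons x xs ih => simp [rightScan, ih]

-- main invariant: processing rest after a pending dot-run gs whose nearest left marker is lm
theorem main_inv (rest : List Char) : ∀ (gs : List Char), (∀ c ∈ gs, isDot c) →
    ∀ (lm : Option Char),
    goB lm gs.length rest =
      List.zipWith combine (leftScan (gs ++ rest) ⊤).1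
        (rightScan (if lm = some 'R' then (0 : WithTop ℤ) else ⊤) (gs ++ rest)) := by
  induction rest with
  | nil =>
      intro gs h lm
      simp only [goB, List.append_nil]
      have := gap_eq gs h lm none
      simpa using this.symm
  | cons c rest ih =>
      intro gs h lm
      by_cases hc : c = 'L' ∨ c = 'R'
      · have hlen : (leftScan gs (leftScan (c :: rest) ⊤).2).1.length
            = (rightScan (if lm = some 'R' then (0 : WithTop ℤ) else ⊤) gs).length := by
          rw [leftScan_fst_length, rightScan_length]
        rcases hc with hc | hc <;> subst hc
        · -- marker 'L'
          simp only [goB]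
          rw [if_pos (by simp)]
          have e1 : leftScan ('L' :: rest) ⊤ = ((0 : WithTop ℤ) :: (leftScan rest ⊤).1, 0) := by
            simp [leftScan, stepL]
          have e2 : ∀ s : WithTop ℤ, rightScan s ('L' :: rest) = ⊤ :: rightScan ⊤ rest := by
            intro s; simp [rightScan, stepR]
          rw [leftScan_append, rightScan_append, e2]
          rw [e1] at hlen ⊢
          simp only
          rw [List.zipWith_append hlen, List.zipWith_cons_cons]
          have hgap := gap_eq gs h lm (some 'L')
          rw [if_pos rfl] at hgap
          rw [hgap]
          congr 1
          rw [List.cons_eq_cons]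
          refine ⟨by simpa using (combine_coe_top 0).symm, ?_⟩
          simpa using ih [] (by simp) (some 'L')
        · -- marker 'R'
          simp only [goB]
          rw [if_pos (by simp)]
          have e1 : leftScan ('R' :: rest) ⊤ = ((⊤ : WithTop ℤ) :: (leftScan rest ⊤).1, ⊤) := by
            simp [leftScan, stepL]
          have e2 : ∀ s : WithTop ℤ, rightScan s ('R' :: rest) = 0 :: rightScan 0 rest := by
            intro s; simp [rightScan, stepR]
          rw [leftScan_append, rightScan_append, e2]
          rw [e1] at hlen ⊢
          simp only
          rw [List.zipWith_append hlen, List.zipWith_cons_cons]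
          have hgap := gap_eq gs h lm (some 'R')
          rw [if_neg (by simp)] at hgap
          rw [hgap]
          congr 1
          rw [List.cons_eq_cons]
          refine ⟨by simpa using (combine_top_coe 0).symm, ?_⟩
          simpa using ih [] (by simp) (some 'R')
      · rw [not_or] at hc
        have h' : ∀ d ∈ gs ++ [c], isDot d := by
          intro d hd
          rcases List.mem_append.mp hd with hd | hd
          · exact h d hd
          · simp at hd; subst hd; exact hc
        have := ih (gs ++ [c]) h' lm
        simp only [goB, if_neg (not_or.mpr hc)]
        rw [show gs.length + 1 = (gs ++ [c]).length by simp, this, List.append_assoc]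
        rfl

-- ===== VERDICT (by name: the statement is the Claim_ definition above) =====
theorem solve_spec : Claim_equal_solve := by
  intro cows _
  unfold Spec_solve solve solve_alt
  have h := main_inv cows.toList [] (by simp) none
  rw [if_neg (by simp : ¬ (none : Option Char) = some 'R')] at h
  simp only [List.nil_append, List.length_nil] at h
  rw [h]
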